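-- pv_equiv track=rewrite | github.com/Ikhwansong/CosProPyLv1 | 1/5/1_5_huti_solution.py | solution
-- ===== SOURCE A (Python) =====
-- def solution(n):
--     # Write code here.
--     li = [1]
--     for i in range(1,n):
--         if i%2 == 1:
--             li.append(2*n*i-i**2)
--         else:
--             li.append((2*n*i)-(i**2-1))
--     return sum(li)
-- ===== SOURCE B (Python) =====
-- def solution(n):
--     # Closed-form: 1 + sum_{i=1}^{n-1} (2*n*i - i^2 + [i even]),
--     # via the Gauss and square-pyramidal sum formulas instead of the loop.
--     if n <= 1:
--         return 1
--     return n * n * (n - 1) - (n - 1) * n * (2 * n - 1) // 6 + 1 + (n - 1) // 2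
-- ===== Notes on version B (the rewrite author's own statement) =====
-- stated objective: faster
-- what changed: Replaced the O(n) loop that builds a list of n terms and sums it with an O(1) closed form using the Gauss and square-pyramidal sum formulas plus the even-index count.
import Mathlib
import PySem

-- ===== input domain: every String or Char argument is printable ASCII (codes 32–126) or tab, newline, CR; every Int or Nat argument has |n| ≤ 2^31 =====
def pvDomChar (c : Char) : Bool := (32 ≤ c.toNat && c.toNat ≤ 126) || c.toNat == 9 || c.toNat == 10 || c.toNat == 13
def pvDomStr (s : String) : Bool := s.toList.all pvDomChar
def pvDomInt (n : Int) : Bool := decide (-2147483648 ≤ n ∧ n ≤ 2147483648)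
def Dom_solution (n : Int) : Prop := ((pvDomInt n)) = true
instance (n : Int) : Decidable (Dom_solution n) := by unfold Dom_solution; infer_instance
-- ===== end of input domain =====

-- B replaces A's loop that builds and sums a list of n terms with a closed-form formula (sum formulas for i, i^2 and the even count).

-- ===== PORT A =====
def solution (n : Int) : Int :=
  ((PySem.List.pyRange 1 n 1).foldl
    (fun li i =>
      if PySem.Int.mod i 2 = 1 then li ++ [2*n*i - i^2]
      else li ++ [(2*n*i) - (i^2 - 1)]) [1]).sum

-- ===== PORT B =====
def solution_alt (n : Int) : Int :=
  if n ≤ 1 then 1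
  else n * n * (n - 1) - PySem.Int.floordiv ((n - 1) * n * (2*n - 1)) 6 + 1
         + PySem.Int.floordiv (n - 1) 2

-- ===== PRECONDITION & SPEC =====
def Spec_solution (n : Int) (out : Int) : Prop := out = solution_alt n
instance (n : Int) (out : Int) : Decidable (Spec_solution n out) := by unfold Spec_solution; infer_instance

-- ===== CLAIM (what is proved, stated in full; the proofs are below) =====
def Claim_equal_solution : Prop := ∀ (n : Int), Dom_solution n → Spec_solution n (solution n)

-- ===== LEMMAS AND PROOFS =====

-- partial sums of i^2 and of the even-index indicator over i = 1..k
def qsum : Nat → Int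
  | 0 => 0
  | k+1 => qsum k + ((k:Int)+1)^2

def ecnt : Nat → Int
  | 0 => 0
  | k+1 => ecnt k + (if ((k:Int)+1) % 2 = 0 then 1 else 0)

theorem qsum_closed (k : Nat) : 6 * qsum k = (k:Int) * (k+1) * (2*k+1) := by
  induction k with
  | zero => simp [qsum]
  | succ k ih => simp only [qsum]; push_cast; push_cast at ih; ring_nf; ring_nf at ih; omega

theorem ecnt_closed (k : Nat) : ecnt k = ((k/2 : Nat) : Int) := by
  induction k with
  | zero => simp [ecnt]
  | succ k ih =>
    simp only [ecnt, ih]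
    by_cases h : ((k:Int)+1) % 2 = 0
    · rw [if_pos h]; omega
    · rw [if_neg h]; omega

theorem loop_sum (n : Int) (k : Nat) :
    ((PySem.List.pyRange 1 (1 + (k:Int)) 1).foldl
      (fun li i =>
        if PySem.Int.mod i 2 = 1 then li ++ [2*n*i - i^2]
        else li ++ [(2*n*i) - (i^2 - 1)]) [1]).sum
      = 1 + n * k * (k+1) - qsum k + ecnt k := by
  induction k with
  | zero => simp [PySem.List.pyRange_one_eq_nil, qsum, ecnt]
  | succ k ih =>
    have h1 : (1:Int) ≤ 1 + (k:Int) := by omega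
    have hr : PySem.List.pyRange 1 (1 + ((k+1:Nat)) : Int) 1
        = PySem.List.pyRange 1 (1 + (k:Int)) 1 ++ [1 + (k:Int)] := by
      have hcast : (1 + ((k+1:Nat):Int)) = (1 + (k:Int)) + 1 := by push_cast; ring
      rw [hcast]
      exact PySem.List.pyRange_one_succ_right h1
    rw [hr, List.foldl_append]
    simp only [List.foldl_cons, List.foldl_nil]
    rw [PySem.Int.mod_eq_emod_of_pos (by omega : (0:Int) < 2)]
    by_cases hpar : (1 + (k:Int)) % 2 = 1
    · rw [if_pos hpar, List.sum_append, ih]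
      simp only [List.sum_cons, List.sum_nil]
      simp only [qsum, ecnt, if_neg (by omega : ¬ ((k:Int)+1) % 2 = 0)]
      push_cast
      ring
    · rw [if_neg hpar, List.sum_append, ih]
      simp only [List.sum_cons, List.sum_nil]
      simp only [qsum, ecnt, if_pos (by omega : ((k:Int)+1) % 2 = 0)]
      push_cast
      ring

-- ===== VERDICT (by name: the statement is the Claim_ definition above) =====
theorem solution_spec : Claim_equal_solution := by
  unfold Claim_equal_solution
  intro n _
  unfold Spec_solution solution solution_alt
  by_cases hle : n ≤ 1
  · rw [PySem.List.pyRange_one_eq_nil hle, if_pos hle]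
    simp
  · have hn : n = 1 + ((n - 1).toNat : Int) := by omega
    rw [if_neg hle, hn]
    set k := (n - 1).toNat with hkdef
    rw [loop_sum (1 + (k:Int)) k]
    rw [PySem.Int.floordiv_eq_ediv_of_pos (by omega : (0:Int) < 6),
        PySem.Int.floordiv_eq_ediv_of_pos (by omega : (0:Int) < 2)]
    have e6 : (1 + (k:Int) - 1) * (1 + (k:Int)) * (2*(1 + (k:Int)) - 1) / 6 = qsum k := by
      have h : (1 + (k:Int) - 1) * (1 + (k:Int)) * (2*(1 + (k:Int)) - 1) = 6 * qsum k := by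
        rw [qsum_closed]; ring
      rw [h]; omega
    have e2 : (1 + (k:Int) - 1) / 2 = ecnt k := by rw [ecnt_closed]; omega
    rw [e6, e2]
    ring
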